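-- pv_equiv track=rewrite | github.com/DragunWF/Competitive-Programming | python/7_kyu/stone_pickaxe.py | stone_pick
-- ===== SOURCE A (Python) =====
-- def stone_pick(arr):
--     inventory = {"Cobblestone": 0, "Sticks": 0}
--     for item in arr:
--         if item == "Sticks" or item == "Cobblestone":
--             inventory[item] += 1
--         elif item == "Wood":
--             inventory["Sticks"] += 4
--     return min(inventory["Cobblestone"] // 3, inventory["Sticks"] // 2)
-- ===== SOURCE B (Python) =====
-- def stone_pick(arr):
--     # Online greedy simulation: craft a pickaxe out of the inventory as soon
--     # as 3 cobblestone and 2 sticks are available; no counting/min/floordiv.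
--     picks = 0
--     cobble = 0
--     sticks = 0
--     for item in arr:
--         if item == "Cobblestone":
--             cobble += 1
--         elif item == "Sticks":
--             sticks += 1
--         elif item == "Wood":
--             sticks += 4
--         while cobble >= 3 and sticks >= 2:
--             cobble -= 3
--             sticks -= 2
--             picks += 1
--     return picks
-- ===== Notes on version B (the rewrite author's own statement) =====
-- stated objective: alternative
-- what changed: Replaced A's count-then-divide scheme (dict tally followed by min of two floor divisions) with an online greedy crafting simulation that consumes 3 cobblestone + 2 sticks and increments a pickaxe counter as soon as the resources are available, so no division or min is computed at all.
import Mathlib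
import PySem

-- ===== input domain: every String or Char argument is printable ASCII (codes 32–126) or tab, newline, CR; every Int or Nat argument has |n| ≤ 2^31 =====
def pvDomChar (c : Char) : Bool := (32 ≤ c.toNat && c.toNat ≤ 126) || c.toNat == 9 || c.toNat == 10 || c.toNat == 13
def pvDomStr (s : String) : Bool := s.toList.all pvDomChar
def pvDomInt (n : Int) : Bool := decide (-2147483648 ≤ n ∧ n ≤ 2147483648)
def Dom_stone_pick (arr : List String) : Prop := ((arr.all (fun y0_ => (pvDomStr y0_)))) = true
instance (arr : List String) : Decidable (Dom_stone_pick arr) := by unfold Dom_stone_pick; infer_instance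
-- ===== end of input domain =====

-- B replaces A's count-then-divide scheme (tally dict, then min of two floor divisions) with an
-- online greedy crafting simulation that never computes a division or a min; objective: alternative.

-- ===== PORT A =====
def stone_pick (arr : List String) : Int :=
  let inventory : PySem.Dict String Int :=
    PySem.Dict.ofList [("Cobblestone", 0), ("Sticks", 0)]
  let inventory := arr.foldl (fun d item =>
    if item = "Sticks" ∨ item = "Cobblestone" then d.modify item 0 (· + 1)
    else if item = "Wood" then d.modify "Sticks" 0 (· + 4)
    else d) inventory
  min (PySem.Int.floordiv (inventory.getD "Cobblestone" 0) 3)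
      (PySem.Int.floordiv (inventory.getD "Sticks" 0) 2)

-- ===== PORT B =====
-- the inner 'while cobble >= 3 and sticks >= 2' loop of Source B
def craftLoop (picks cobble sticks : Int) : Int × Int × Int :=
  if h : 3 ≤ cobble ∧ 2 ≤ sticks then craftLoop (picks + 1) (cobble - 3) (sticks - 2)
  else (picks, cobble, sticks)
termination_by cobble.toNat
decreasing_by omega

def stone_pick_alt (arr : List String) : Int :=
  (arr.foldl (fun st item =>
    let st :=
      if item = "Cobblestone" then (st.1, st.2.1 + 1, st.2.2)
      else if item = "Sticks" then (st.1, st.2.1, st.2.2 + 1)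
      else if item = "Wood" then (st.1, st.2.1, st.2.2 + 4)
      else st
    craftLoop st.1 st.2.1 st.2.2) ((0 : Int), (0 : Int), (0 : Int))).1

-- ===== PRECONDITION & SPEC =====
def Spec_stone_pick (arr : List String) (out : Int) : Prop := out = stone_pick_alt arr
instance (arr : List String) (out : Int) : Decidable (Spec_stone_pick arr out) := by unfold Spec_stone_pick; infer_instance

-- ===== CLAIM (what is proved, stated in full; the proofs are below) =====
def Claim_equal_stone_pick : Prop := ∀ (arr : List String), Dom_stone_pick arr → Spec_stone_pick arr (stone_pick arr)

-- ===== LEMMAS AND PROOFS =====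

def pvStepA (d : PySem.Dict String Int) (item : String) : PySem.Dict String Int :=
  if item = "Sticks" ∨ item = "Cobblestone" then d.modify item 0 (· + 1)
  else if item = "Wood" then d.modify "Sticks" 0 (· + 4)
  else d

-- loop invariant for A: the dict's two tallies after the fold, in terms of counts
theorem pv_loopA (arr : List String) : ∀ (d : PySem.Dict String Int),
    ((arr.foldl pvStepA d).getD "Cobblestone" 0
       = d.getD "Cobblestone" 0 + (arr.count "Cobblestone" : Int))
  ∧ ((arr.foldl pvStepA d).getD "Sticks" 0
       = d.getD "Sticks" 0 + (arr.count "Sticks" : Int) + 4 * (arr.count "Wood" : Int)) := by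
  induction arr with
  | nil => intro d; simp
  | cons x xs ih =>
    intro d
    obtain ⟨ihc, ihs⟩ := ih (pvStepA d x)
    simp only [List.foldl_cons, List.count_cons]
    constructor
    · rw [ihc]
      by_cases hx : x = "Cobblestone"
      · subst hx
        simp [pvStepA, PySem.Dict.getD_modify_self]
        ring
      · have : (pvStepA d x).getD "Cobblestone" 0 = d.getD "Cobblestone" 0 := by
          unfold pvStepA
          by_cases h1 : x = "Sticks" ∨ x = "Cobblestone"
          · rcases h1 with h1 | h1
            · subst h1
              rw [if_pos (Or.inl rfl), PySem.Dict.getD_modify_of_ne _ _ _ (by decide)]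
            · exact absurd h1 hx
          · rw [if_neg h1]
            by_cases hw : x = "Wood"
            · subst hw
              rw [if_pos rfl, PySem.Dict.getD_modify_of_ne _ _ _ (by decide)]
            · rw [if_neg hw]
        rw [this]
        simp [hx]
    · rw [ihs]
      by_cases hs : x = "Sticks"
      · subst hs
        simp [pvStepA, PySem.Dict.getD_modify_self]
        ring
      · by_cases hw : x = "Wood"
        · subst hw
          simp [pvStepA, PySem.Dict.getD_modify_self]
          ring
        · have : (pvStepA d x).getD "Sticks" 0 = d.getD "Sticks" 0 := by
            unfold pvStepA
            by_cases h1 : x = "Sticks" ∨ x = "Cobblestone"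
            · rcases h1 with h1 | h1
              · exact absurd h1 hs
              · subst h1
                rw [if_pos (Or.inr rfl), PySem.Dict.getD_modify_of_ne _ _ _ (by decide)]
            · rw [if_neg h1, if_neg hw]
          rw [this]
          simp [hs, hw]

-- characterisation of the inner while loop of B

theorem craftLoop_eq (p c s : Int) (hc : 0 ≤ c) (hs : 0 ≤ s) :
    craftLoop p c s
      = (p + min (c / 3) (s / 2), c - 3 * min (c / 3) (s / 2), s - 2 * min (c / 3) (s / 2)) := by
  fun_induction craftLoop p c s with
  | case1 p c s h ih =>
    have h3 : (c - 3) / 3 = c / 3 - 1 := by omega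
    have h2 : (s - 2) / 2 = s / 2 - 1 := by omega
    rw [ih (by omega) (by omega), h3, h2]
    have hmin : min (c / 3 - 1) (s / 2 - 1) = min (c / 3) (s / 2) - 1 := by
      rcases le_total (c / 3) (s / 2) with h' | h' <;> simp [h']
    rw [hmin]
    refine Prod.ext (by ring) (Prod.ext (by ring) (by ring))
  | case2 p c s h =>
    have : min (c / 3) (s / 2) = 0 := by
      rcases not_and_or.mp h with h' | h'
      · have : c / 3 = 0 := by omega
        rw [this]; exact min_eq_left (by omega)
      · have : s / 2 = 0 := by omega
        rw [this]; exact min_eq_right (by omega)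
    rw [this]
    refine Prod.ext (by ring) (Prod.ext (by ring) (by ring))

def pvStepB (st : Int × Int × Int) (item : String) : Int × Int × Int :=
  let st :=
    if item = "Cobblestone" then (st.1, st.2.1 + 1, st.2.2)
    else if item = "Sticks" then (st.1, st.2.1, st.2.2 + 1)
    else if item = "Wood" then (st.1, st.2.1, st.2.2 + 4)
    else st
  craftLoop st.1 st.2.1 st.2.2

def pvCC (xs : List String) : Int := (xs.count "Cobblestone" : Int)
def pvSS (xs : List String) : Int := (xs.count "Sticks" : Int) + 4 * (xs.count "Wood" : Int)

theorem pvShift (p m X Y : Int) :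
    p + m + min ((X - 3 * m) / 3) ((Y - 2 * m) / 2) = p + min (X / 3) (Y / 2) := by
  have e1 : (X - 3 * m) / 3 = X / 3 - m := by omega
  have e2 : (Y - 2 * m) / 2 = Y / 2 - m := by omega
  rw [e1, e2]
  have : min (X / 3 - m) (Y / 2 - m) = min (X / 3) (Y / 2) - m := by
    rcases le_total (X / 3) (Y / 2) with h | h
    · rw [min_eq_left (by omega), min_eq_left h]
    · rw [min_eq_right (by omega), min_eq_right h]
  rw [this]; ring

theorem pv_loopB (xs : List String) : ∀ (p c s : Int), 0 ≤ c → 0 ≤ s →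
    (xs.foldl pvStepB (craftLoop p c s)).1
      = p + min ((c + pvCC xs) / 3) ((s + pvSS xs) / 2) := by
  induction xs with
  | nil =>
    intro p c s hc hs
    simp [pvCC, pvSS, craftLoop_eq p c s hc hs]
  | cons x xs ih =>
    intro p c s hc hs
    rw [craftLoop_eq p c s hc hs]
    set m := min (c / 3) (s / 2) with hm
    have hmc : 3 * m ≤ c := by
      have := min_le_left (c / 3) (s / 2); rw [← hm] at this; omega
    have hms : 2 * m ≤ s := by
      have := min_le_right (c / 3) (s / 2); rw [← hm] at this; omega
    have hCC : pvCC (x :: xs) = pvCC xs + (if x = "Cobblestone" then 1 else 0) := by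
      by_cases h : x = "Cobblestone" <;> simp [pvCC, h]
    have hSS : pvSS (x :: xs) = pvSS xs + (if x = "Sticks" then 1 else 0)
        + 4 * (if x = "Wood" then 1 else 0) := by
      by_cases h1 : x = "Sticks" <;> by_cases h2 : x = "Wood" <;>
        simp_all [pvSS] <;> ring
    rw [List.foldl_cons, hCC, hSS]
    by_cases h1 : x = "Cobblestone"
    · have hstep : pvStepB (p + m, c - 3 * m, s - 2 * m) x
          = craftLoop (p + m) (c - 3 * m + 1) (s - 2 * m) := by simp [pvStepB, h1]
      rw [hstep, ih (p + m) _ _ (by omega) (by omega)]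
      rw [(by ring : c - 3 * m + 1 + pvCC xs = (c + (pvCC xs + 1)) - 3 * m),
          (by ring : s - 2 * m + pvSS xs = (s + pvSS xs) - 2 * m), pvShift]
      simp [h1]
    · by_cases h2 : x = "Sticks"
      · have hstep : pvStepB (p + m, c - 3 * m, s - 2 * m) x
            = craftLoop (p + m) (c - 3 * m) (s - 2 * m + 1) := by simp [pvStepB, h2]
        rw [hstep, ih (p + m) _ _ (by omega) (by omega)]
        rw [(by ring : c - 3 * m + pvCC xs = (c + pvCC xs) - 3 * m),
            (by ring : s - 2 * m + 1 + pvSS xs = (s + (pvSS xs + 1)) - 2 * m), pvShift]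
        simp [h2]
      · by_cases h3 : x = "Wood"
        · have hstep : pvStepB (p + m, c - 3 * m, s - 2 * m) x
              = craftLoop (p + m) (c - 3 * m) (s - 2 * m + 4) := by simp [pvStepB, h3]
          rw [hstep, ih (p + m) _ _ (by omega) (by omega)]
          rw [(by ring : c - 3 * m + pvCC xs = (c + pvCC xs) - 3 * m),
              (by ring : s - 2 * m + 4 + pvSS xs = (s + (pvSS xs + 4)) - 2 * m), pvShift]
          simp [h3]
        · have hstep : pvStepB (p + m, c - 3 * m, s - 2 * m) x
              = craftLoop (p + m) (c - 3 * m) (s - 2 * m) := by simp [pvStepB, h1, h2, h3]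
          rw [hstep, ih (p + m) _ _ (by omega) (by omega)]
          rw [(by ring : c - 3 * m + pvCC xs = (c + pvCC xs) - 3 * m),
              (by ring : s - 2 * m + pvSS xs = (s + pvSS xs) - 2 * m), pvShift]
          simp [h1, h2, h3]

-- ===== VERDICT (by name: the statement is the Claim_ definition above) =====
theorem stone_pick_spec : Claim_equal_stone_pick := by
  intro arr _
  unfold Spec_stone_pick stone_pick stone_pick_alt
  have hfunA : (fun (d : PySem.Dict String Int) (item : String) =>
      if item = "Sticks" ∨ item = "Cobblestone" then d.modify item 0 (· + 1)
      else if item = "Wood" then d.modify "Sticks" 0 (· + 4)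
      else d) = pvStepA := rfl
  have hfunB : (fun (st : Int × Int × Int) (item : String) =>
      let st :=
        if item = "Cobblestone" then (st.1, st.2.1 + 1, st.2.2)
        else if item = "Sticks" then (st.1, st.2.1, st.2.2 + 1)
        else if item = "Wood" then (st.1, st.2.1, st.2.2 + 4)
        else st
      craftLoop st.1 st.2.1 st.2.2) = pvStepB := rfl
  rw [hfunA, hfunB]
  obtain ⟨hc, hs⟩ := pv_loopA arr (PySem.Dict.ofList [("Cobblestone", 0), ("Sticks", 0)])
  have h0c : (PySem.Dict.ofList [("Cobblestone", (0:Int)), ("Sticks", 0)]).getD "Cobblestone" 0 = 0 := by decide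
  have h0s : (PySem.Dict.ofList [("Cobblestone", (0:Int)), ("Sticks", 0)]).getD "Sticks" 0 = 0 := by decide
  rw [show ((0 : Int), (0 : Int), (0 : Int)) = craftLoop 0 0 0 from by rw [craftLoop_eq 0 0 0 le_rfl le_rfl]; norm_num,
      pv_loopB arr 0 0 0 le_rfl le_rfl]
  simp only [hc, hs, h0c, h0s, zero_add, pvCC, pvSS]
  rw [PySem.Int.floordiv_eq_ediv_of_pos (by omega), PySem.Int.floordiv_eq_ediv_of_pos (by omega)]
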